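/- GENERATED by mk_final_copies.py from the proof of the farm's unit `start_decoder.C8e` (farm:start_decoder.C8e.1: Proof.lean) as the
   re-elaboration sweep compiled it — do not edit. -/
import Asan.CheckWalk
import Vorbis.Spec.StartDecoderC4
import Vorbis.Spec.Units.start_decoder_C8e

open X86 X86.User Asan Vorbis Vorbis.Spec Vorbis.Spec.StartDecoder

set_option maxRecDepth 100000
set_option maxHeartbeats 4000000

namespace Vorbis.Spec.start_decoder_C8e

/-- **The clauses of the book under construction over a step that keeps every setup block** (both arms of C8e: the pushed return
address of a check, resp. the whole `call setup_temp_free`): the struct `cb(i)` lies in the codebooks block and the `sorted_values`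
block is a setup block, so every field reads the same and K1, K2, K4, K4c, `Fresh3` carry over. -/
theorem c8e_fields {u₀ : State} {g : Ghost} {i : Nat} {A2 A3 Ai Aw Ab : Arena} {A : Arena × List Obj} {lengths values : Nat}
    {v : State} {m' : Mem} (h : In8S u₀ g i A2 A3 Ai Aw Ab A lengths values v) (hkept : AllKept A.1.Blk v.mem m') :
    Codebook.SameFields v.mem m' (g.cb v.mem i) ∧ Codebook.K1 m' (g.cb v.mem i) ∧ Codebook.K2 m' (g.cb v.mem i) ∧
      Codebook.K4 (Since Ai A.1) m' (g.cb v.mem i) ∧ Codebook.K4c m' (g.cb v.mem i) ∧ Fresh3 m' (g.cb v.mem i) := by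
  have hcur := h.core.cur
  have hcbOK := hcur.ages.cbOK
  have hkI : AllKept Ai.Blk v.mem m' := fun B hB => hkept B (hB.mono hcur.ages.exti)
  have hstruct : (Codebook.block (g.cb v.mem i)).Kept v.mem m' := hcbOK.cb_kept (hkI _ hcbOK.F2) i hcur.lt
  have hsf := Codebook.SameFields.of_kept hstruct
  have hsv : 1 ≤ Codebook.sorted_entries v.mem (g.cb v.mem i) → (Codebook.svBlock v.mem (g.cb v.mem i)).Kept v.mem m' :=
    fun hse => hkept _ (h.k4.sv hse).blk
  refine ⟨hsf, h.core.k1.frame hsf, h.core.k2.frame hsf, ?_, ?_, ?_⟩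
  · apply h.k4.frame hsf
    intro hse
    exact (hsv hse).i32 _ (Nat.le_refl _) (by simp only []; omega)
  · apply h.k4c.frame hsf
    intro x hx
    have hse : 1 ≤ Codebook.sorted_entries v.mem (g.cb v.mem i) := by omega
    simp only [Codebook.sorted_values_at]
    apply (hsv hse).i32
    · simp only []
      omega
    · simp only []
      omega
  · exact
      { lookup_type := by rw [hsf.lookup_type]; exact h.core.fresh.lookup_type
        lookup_values := by rw [hsf.lookup_values]; exact h.core.fresh.lookup_values
        multiplicands := by rw [hsf.multiplicands]; exact h.core.fresh.multiplicands }

/-- **`InC9` for a dense book** (the `jne` of 0x11471e not taken; cut117 = 0x114724): the only store since the join is the return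
address of the check of `c->sparse`, in `[R − 8, R)`. `Frame` / CUR(i) by the carry layer, K3 by `C8.core_k3_dense`, no temp
block (`Core8.dense_temps`), the other clauses by `c8e_fields`. -/
theorem c8e_dense_build {u₀ : State} {g : Ghost} {i : Nat} {A2 A3 Ai Aw Ab : Arena} {A : Arena × List Obj} {lengths values : Nat}
    {v w : State} (h : In8S u₀ g i A2 A3 Ai Aw Ab A lengths values v)
    (hsp : Codebook.sparse v.mem (g.cb v.mem i) = 0)
    (hs : Mem.SameExcept [⟨g.R - 8, g.R⟩] v.mem w.mem) (hun : ShadowUntouched v.mem w.mem)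
    (hrip : w.rip = L.start_decoder.cut117) (hrsp : w.reg .rsp = v.reg .rsp) (hcode : CodeOK u₀ w.mem) (hinv : abiInv w)
    (hr14 : w.reg .r14 = v.reg .r14) : AtC9 u₀ g i w := by
  have hfr := h.frame
  have hcur := h.core.cur
  have hpos : Pos g A := Pos.of hfr hcur
  have p1 := hpos.r_eq
  have p2 := hpos.ra_lo
  have p3 := hpos.ra_hi
  have p11 := hpos.ar_stack
  have hok0 : ∀ x, x ∈ [(⟨g.R - 8, g.R⟩ : Span)] → OkWin g Ai A (g.cb v.mem i) x := by
    intro x hx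
    rw [List.mem_singleton.mp hx]
    left
    unfold OkWin0
    left
    simp only []
    omega
  have hb : Bits (g.Blk A) g.len w.mem g.f := by
    apply bits_kept hpos hcur.sd.bits hs
    intro x hx
    rw [List.mem_singleton.mp hx]
    left
    simp only []
    omega
  have hfr' := Frame.step hfr hcur hs hun hok0 hb hrip hrsp hcode hinv
  obtain ⟨hcur', hcb⟩ := Cur.step hfr hcur hs hun hok0 hb hr14
  have hkept : AllKept A.1.Blk v.mem w.mem := by
    apply allKept_off_arena hcur.sd.arena hs
    intro x hx
    rw [List.mem_singleton.mp hx]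
    simp only []
    omega
  obtain ⟨hsf, k1, k2, k4, k4c, hfresh⟩ := c8e_fields h hkept
  have k3 : Codebook.K3 (Since Ai A.1) w.mem (g.cb v.mem i) := (C8.core_k3_dense h.core hsp).frame hsf
  refine ⟨A, A2, A3, Ai, ?_⟩
  exact
    { frame := hfr'
      cur := hcur'
      k1 := by rw [hcb]; exact k1
      k2 := by rw [hcb]; exact k2
      k3 := by rw [hcb]; exact k3
      k4 := by rw [hcb]; exact k4
      k4c := by rw [hcb]; exact k4c
      noTemps := h.core.dense_temps hsp
      fresh := by rw [hcb]; exact hfresh }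

/-- **The temp list without its top block**: when the blocks outstanding are `b :: bs` (by absolute address), the ghost list is
`(b.1 − B, b.2) :: rest` with `rest` the offsets of `bs`, and after the release (`withTemp T' rest`) the blocks outstanding are `bs`. -/
theorem c8e_temps_tail {A : Arena} {b : Nat × Nat} {bs : List (Nat × Nat)} (h : TempsAre A (b :: bs)) (T' : Nat) :
    A.temps = (b.1 - A.B, b.2) :: bs.map (fun b => (b.1 - A.B, b.2)) ∧
      TempsAre (A.withTemp T' (bs.map (fun b => (b.1 - A.B, b.2)))) bs := by
  refine ⟨?_, ?_, ?_⟩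
  · rw [h.1, List.map_cons]
  · rfl
  · intro x hx
    exact h.2 x (List.mem_cons_of_mem _ hx)

/-- **`In8F` for a sparse book, pure part** (cut144 = 0x114b24, `setup_temp_free(f, values, 4·SE)` returned): `Frame` and CUR(i) at
the returned state `w` for the ghost `A'` (same setup blocks, the temp blocks P2, P1 left), `cb(i)` unmoved, every setup block of `A`
kept (`Cur.free_call` gives these four), and the three callee-saved registers the rest of C8 reads. -/
theorem c8e_sparse_build {u₀ : State} {g : Ghost} {i : Nat} {A2 A3 Ai Aw Ab : Arena} {A A' : Arena × List Obj}
    {lengths values : Nat} {v w : State} (h : In8S u₀ g i A2 A3 Ai Aw Ab A lengths values v)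
    (hsp : Codebook.sparse v.mem (g.cb v.mem i) = 1)
    (hF : Frame u₀ g L.start_decoder.cut144 A' w) (hC : Cur g i A2 A3 Ai A' w)
    (hcb : g.cb w.mem i = g.cb v.mem i) (hkept : AllKept A.1.Blk v.mem w.mem)
    (hblk : ∀ B, Since Ai A.1 B → Since Ai A'.1 B)
    (htemps : TempsAre A'.1
      [(Codebook.codewords v.mem (g.cb v.mem i), 4 * (Codebook.sorted_entries v.mem (g.cb v.mem i)).toNat),
       (lengths, (Codebook.entries v.mem (g.cb v.mem i)).toNat)])
    (hr15 : w.reg .r15 = addr g.f) (hrbp : w.reg .rbp = addr (g.cb v.mem i + 0x840)) (hrbx : w.reg .rbx = addr lengths) :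
    At8F u₀ g i w := by
  obtain ⟨hsf, k1, k2, k4, k4c, hfresh⟩ := c8e_fields h hkept
  have hcl : Since Ai A.1 ⟨Codebook.codeword_lengths v.mem (g.cb v.mem i),
      (Codebook.sorted_entries v.mem (g.cb v.mem i)).toNat⟩ :=
    ((h.core.sparse_lengths hsp).older h.core.extw).mono h.core.extb'
  refine ⟨A', lengths, A2, A3, Ai, ?_⟩
  exact
    { frame := hF
      cur := hC
      k1 := by rw [hcb]; exact k1
      k2 := by rw [hcb]; exact k2
      k4 := by rw [hcb]; exact K4.mono k4 hblk
      k4c := by rw [hcb]; exact k4c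
      fresh := by rw [hcb]; exact hfresh
      sparse1 := by rw [hcb, hsf.sparse]; exact hsp
      cl := by rw [hcb, hsf.codeword_lengths, hsf.sorted_entries]; exact hblk _ hcl
      temps := by rw [hcb, hsf.codewords, hsf.sorted_entries, hsf.entries]; exact htemps
      r15 := hr15
      rbp := by rw [hcb]; exact hrbp
      rbx := hrbx }

/-- **The LIFO precondition of `setup_temp_free(f, values, 4·SE)` at 0x114b1f** (as `c5c_free_pre` of the worked unit C5c, with
blocks left below the top one): the state `s` at the callee's entry has the memory of the join but for the pushed return
addresses below `R`; the top temp block is `(T, m)`, `p = B + T`. -/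
theorem c8e_free_pre {u₀ : State} {g : Ghost} {i : Nat} {A2 A3 Ai : Arena} {A : Arena × List Obj} {pc : Word} {v s : State}
    {p m : Nat} {rest : List (Nat × Nat)} (hfr : Frame u₀ g pc A v) (hcur : Cur g i A2 A3 Ai A v)
    (hT : A.1.temps = (A.1.T, m) :: rest) (hp : p = A.1.B + A.1.T)
    (hun : ShadowUntouched v.mem s.mem) (hmem : Mem.EqOn (g.f + 112) (g.f + 136) v.mem s.mem)
    (hrsp : (s.reg .rsp).toNat + 8 = g.R) (hrdi : (s.reg .rdi).toNat = g.f) (hrsi : (s.reg .rsi).toNat = p)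
    (hrdx : (s.reg .rdx).toNat % 2 ^ 32 = m) :
    (setup_temp_free.spec A.2 g.frames' A.1 m rest).pre s := by
  have hob := hcur.sd.bits.OB1
  have hpos : Pos g A := Pos.of hfr hcur
  have hf1 := hpos.f_lo
  have hf2 := hpos.f_hi
  refine ⟨⟨⟨?_, hfr.offText⟩, ?_, ?_, hcur.hand.arenaText⟩, Or.inr ⟨hT, ?_, ?_, ?_⟩⟩
  · rw [hrsp]
    exact hfr.shadow.untouched hun
  · rw [hrdi]
    exact hcur.sd.env.live _ hob
  · rw [hrdi]
    apply hcur.sd.arena.frame (by simp only [voff]; omega)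
    simp only [voff]
    exact hmem
  · rw [hrsi, hp]
  · rw [hrdx]
  · rw [hrdi]
    exact setup_temp_free.apart_of_out hcur.sd.arena hT hcur.hand.objOut

/-- The walker's form of `lea edx, [rax*4]` for a value below 2^30 (as `c6a_lea4` of the worked unit C6a). -/
theorem c8e_lea4 (x : BitVec 32) (h : x.toNat < 2 ^ 30) :
    (Word.ofBV (BitVec.setWidth 32 (Word.ofBV x * 4).toBitVec)).toNat = 4 * x.toNat := by
  have e4 : (4 : Word).toNat = 4 := rfl
  rw [toNat_ofBV32, BitVec.toNat_setWidth, UInt64.toNat_toBitVec, UInt64.toNat_mul, toNat_ofBV32, e4]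
  omega

/-- **Segment C8e, a dense book** (0x114710 – 0x11471e, line 3864): the checked load of `c->sparse` (`C7.cb_site … 27 1`), the `cmp`
reads 0, the `jne` falls through to cut117 = 0x114724: `c8e_dense_build`. -/
theorem c8e_dense_walk {Lay : Layout} (hLay : Lay.hi = 0x1000000) {μ : Microarch} (hμ : UserX.MicroOK μ) {u₀ : State}
    (hcode : HasCodeNat Lay u₀ Vorbis.L.start_decoder.entry Vorbis.Code.code_start_decoder.nat Vorbis.L.start_decoder.size)
    (hld1 : Asan.SmallCheck Lay μ Vorbis.WayInv (Vorbis.CodeOK u₀) [.rax, .rdx] 1 Vorbis.L.__asan_load1_noabort.entry)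
    {g : Ghost} {i : Nat} {A2 A3 Ai Aw Ab : Arena} {A : Arena × List Obj} {lengths values : Nat} {v : State}
    (h : In8S u₀ g i A2 A3 Ai Aw Ab A lengths values v) (hsp : Codebook.sparse v.mem (g.cb v.mem i) = 0) :
    ReachVia Lay μ WayInv v (fun w => AtC9 u₀ g i w ∨ At8F u₀ g i w) := by
  have hfr0 := h.frame
  have hcur := h.core.cur
  have he := hfr0.entry
  v_entry he
  simp only [depth] at he_room he_stack
  have w_rip := hfr0.rip
  have hpos : Pos g A := Pos.of hfr0 hcur
  have p1 := hpos.r_eq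
  have p2 := hpos.ra_lo
  have p3 := hpos.ra_hi
  have hRA : g.RA = (g.e.reg .rsp).toNat := rfl
  have hR : (v.reg .rsp).toNat = g.R := by
    rw [hfr0.rsp]
    exact toNat_addr _ (by omega)
  have w_eq : Mem.EqOn Vorbis.L.textLo Vorbis.L.textHi u₀.mem v.mem := hfr0.code
  have hdf : v.flags .df = false := (show abiInv _ from hfr0.inv).1
  have hmx : v.mxcsr &&& 0x1F80 = 0x1F80 := (show abiInv _ from hfr0.inv).2
  have hsse := Vorbis.sseOK_of_abiInv hfr0.inv
  have hm0 : MInv g i A2 A3 Ai A v.mem := MInv.of hfr0 hcur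
  obtain ⟨⟨hc1, hc2⟩, hc3, hc4⟩ := hm0.c_where
  -- r14 = c stays an atom of the walk; its value as a number
  have h14 : (v.reg .r14).toNat = g.cb v.mem i := by
    rw [hcur.r14]
    exact toNat_addr _ (by omega)
  -- the load of `c->sparse` (0x114719), named before the walk
  have r_sp : v.mem.readLE (v.reg .r14 + 27) 1 = 0 := by
    rw [hcur.r14, Vorbis.addr_add_lit]
    exact hsp
  u_walk hcode [hμ.vendor] until [Vorbis.L.start_decoder.cut117, Vorbis.L.start_decoder.cut144]
    span [Vorbis.L.textLo, Vorbis.L.textHi] side (v_side)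
  case check_114714 =>
    -- 0x114714: the check of `c->sparse`, one byte at offset 27 of the struct `cb(i)`
    have hun : ShadowUntouched v.mem s_114714.mem := by v_untouched
    apply Vorbis.Spec.check_site hfr0.shadow hun (C7.cb_site hcur 27 1 (by omega) (by omega))
    u_omega
  -- cut117 = 0x114724: the exit `AtC9`
  have hs : Mem.SameExcept [⟨g.R - 8, g.R⟩] v.mem s_11471e.mem := by u_same
  have hun : ShadowUntouched v.mem s_11471e.mem := by v_untouched
  have hinv : abiInv s_11471e := by v_inv
  exact ReachVia.done (Or.inl (c8e_dense_build h hsp hs hun w_rip w_rsp w_eq hinv (w_kept.get .r14 rfl)))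

/-- **Segment C8e, a sparse book** (0x114710 – 0x11471e, 0x114af7 – 0x114b1f, lines 3864–3865): the checked load of `c->sparse`
reads 1, the `jne` is taken; `rbp = &c->sorted_entries`, its check, `edx = 4·SE`, `rsi = r12 = values`, `r15 = [R+18H] = f`,
`call setup_temp_free` releases the top temp block P3 (`Cur.free_call`); cut144 = 0x114b24: `c8e_sparse_build`. -/
theorem c8e_sparse_walk {Lay : Layout} (hLay : Lay.hi = 0x1000000) {μ : Microarch} (hμ : UserX.MicroOK μ) {u₀ : State}
    (hcode : HasCodeNat Lay u₀ Vorbis.L.start_decoder.entry Vorbis.Code.code_start_decoder.nat Vorbis.L.start_decoder.size)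
    (hld4 : Asan.SmallCheck Lay μ Vorbis.WayInv (Vorbis.CodeOK u₀) [.rax, .rcx, .rdx] 4 Vorbis.L.__asan_load4_noabort.entry)
    (hld1 : Asan.SmallCheck Lay μ Vorbis.WayInv (Vorbis.CodeOK u₀) [.rax, .rdx] 1 Vorbis.L.__asan_load1_noabort.entry)
    (hfree : ∀ (others : List Obj) (frames : List (Nat × FrameLayout)) (A : Arena) (m : Nat) (rest : List (Nat × Nat)), Calls Lay μ Vorbis.WayInv (Vorbis.conv u₀) Vorbis.L.setup_temp_free.entry (Vorbis.Spec.setup_temp_free.spec others frames A m rest))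
    {g : Ghost} {i : Nat} {A2 A3 Ai Aw Ab : Arena} {A : Arena × List Obj} {lengths values : Nat} {v : State}
    (h : In8S u₀ g i A2 A3 Ai Aw Ab A lengths values v) (hsp : Codebook.sparse v.mem (g.cb v.mem i) = 1) :
    ReachVia Lay μ WayInv v (fun w => AtC9 u₀ g i w ∨ At8F u₀ g i w) := by
  have hfr0 := h.frame
  have hcur := h.core.cur
  have he := hfr0.entry
  v_entry he
  simp only [depth] at he_room he_stack
  have w_rip := hfr0.rip
  have hpos : Pos g A := Pos.of hfr0 hcur
  have p1 := hpos.r_eq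
  have p2 := hpos.ra_lo
  have p3 := hpos.ra_hi
  have p4 := hpos.ar_lo
  have p5 := hpos.ar_hi
  have hf2 := hpos.f_hi
  have hRA : g.RA = (g.e.reg .rsp).toNat := rfl
  have hR : (v.reg .rsp).toNat = g.R := by
    rw [hfr0.rsp]
    exact toNat_addr _ (by omega)
  have w_eq : Mem.EqOn Vorbis.L.textLo Vorbis.L.textHi u₀.mem v.mem := hfr0.code
  have hdf : v.flags .df = false := (show abiInv _ from hfr0.inv).1
  have hmx : v.mxcsr &&& 0x1F80 = 0x1F80 := (show abiInv _ from hfr0.inv).2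
  have hsse := Vorbis.sseOK_of_abiInv hfr0.inv
  have hm0 : MInv g i A2 A3 Ai A v.mem := MInv.of hfr0 hcur
  obtain ⟨⟨hc1, hc2⟩, hc3, hc4⟩ := hm0.c_where
  -- r14 = c stays an atom of the walk; its value as a number
  have h14 : (v.reg .r14).toNat = g.cb v.mem i := by
    rw [hcur.r14]
    exact toNat_addr _ (by omega)
  have c_r12 := h.core.r12
  -- the load of `c->sparse` (0x114719), named before the walk
  have r_sp : v.mem.readLE (v.reg .r14 + 27) 1 = 1 := by
    rw [hcur.r14, Vorbis.addr_add_lit]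
    exact hsp
  -- the load of `c->sorted_entries` (0x114b06): `n = SE`, `0 ≤ SE < 2^24`
  have hse0 := h.core.k2.se_nonneg
  have hse1 := h.core.k2.se_le
  have hent := h.core.k1.ent_lt
  obtain ⟨n, hn⟩ : ∃ n : Nat, n = (Codebook.sorted_entries v.mem (g.cb v.mem i)).toNat := ⟨_, rfl⟩
  have r_se : v.mem.readLE (v.reg .r14 + 2112) 4 = n := by
    have h0 := hse0
    rw [hn]
    simp only [vacc, voff] at h0 ⊢
    rw [hcur.r14, Vorbis.addr_add_lit]
    exact v.mem.u32_of_i32_nonneg (g.cb v.mem i + 2112) h0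
  have hn24 : n < 2 ^ 24 := by omega
  -- the spill slot of `f` (0x114b17)
  have r_f : v.mem.readLE (v.reg .rsp + 24) 8 = g.f := by
    have := hcur.slot_f
    rw [hfr0.rsp]
    simp only [vfield]
    exact this
  -- P3 = (values, 4·SE) is the top temp block: `values = B + T`; `rest` = the ghost entries of P2, P1
  have htemps := h.core.sparse_temps hsp
  rw [← hn] at htemps
  obtain ⟨rest, hrest⟩ : ∃ rest : List (Nat × Nat), rest = List.map (fun b => (b.1 - A.1.B, b.2))
      [(Codebook.codewords v.mem (g.cb v.mem i), 4 * n), (lengths, (Codebook.entries v.mem (g.cb v.mem i)).toNat)] :=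
    ⟨_, rfl⟩
  have hT0 := (c8e_temps_tail htemps 0).1
  rw [← hrest] at hT0
  have hvB : A.1.B ≤ values := htemps.2 (values, _) List.mem_cons_self
  obtain ⟨htop, htopL⟩ := hcur.sd.arena.top_eq_T hT0
  simp only [] at htop hT0
  have hT : A.1.temps = (A.1.T, 4 * n) :: rest := by
    rw [hT0, htop]
  have hval : values = A.1.B + A.1.T := by omega
  have hfr := hfree A.2 g.frames' A.1 (4 * n) rest
  have p6 := hpos.f_stack
  u_walk hcode [hμ.vendor] until [Vorbis.L.start_decoder.cut117, Vorbis.L.start_decoder.cut144]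
    span [Vorbis.L.textLo, Vorbis.L.textHi] side (v_side)
  case check_114714 =>
    -- 0x114714: the check of `c->sparse`, one byte at offset 27 of the struct `cb(i)`
    have hun : ShadowUntouched v.mem s_114714.mem := by v_untouched
    apply Vorbis.Spec.check_site hfr0.shadow hun (C7.cb_site hcur 27 1 (by omega) (by omega))
    u_omega
  case check_114b01 =>
    -- 0x114b01: the check of `c->sorted_entries`, four bytes at offset 2112
    have hun : ShadowUntouched v.mem s_114b01.mem := by v_untouched
    apply Vorbis.Spec.check_site hfr0.shadow hun (C7.cb_site hcur 2112 4 (by omega) (by omega))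
    u_omega
  case call_inv => v_inv
  case pre_114b1f =>
    -- 0x114b1f: `setup_temp_free(f, values, 4·SE)` releases the top temp block
    have hun : ShadowUntouched v.mem s_114b1f.mem := by v_untouched
    refine c8e_free_pre hfr0 hcur hT hval hun ?_ ?_ ?_ ?_ ?_
    · rw [w_mem]
      apply Mem.EqOn.writeLE
      · u_omega
      · u_omega
    · rw [w_rsp]
      u_omega
    · rw [w_rdi]
      exact toNat_addr _ (by omega)
    · rw [w_rsi]
      exact toNat_addr _ (by omega)
    · rw [w_rdx, c8e_lea4 _ (by rw [BitVec.toNat_ofNat]; omega), BitVec.toNat_ofNat]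
      omega
  -- cut144 = 0x114b24: setup_temp_free returned
  simp only [X86.User.Spec.footprint, vspec] at w_same
  have e_sp : (s_114b1f.reg .rsp).toNat + 8 = g.R := by
    rw [w_rsp_114b1f]
    u_omega
  have e_a : (v.reg .rsp - 8).toNat + 8 = g.R := by u_omega
  have e_rdi : (s_114b1f.reg .rdi).toNat = g.f := by
    rw [w_rdi_114b1f]
    exact toNat_addr _ (by omega)
  have e_rsi : (s_114b1f.reg .rsi).toNat = A.1.B + A.1.T := by
    rw [w_rsi_114b1f, ← hval]
    exact toNat_addr _ (by omega)
  have e_rdx : (s_114b1f.reg .rdx).toNat % 2 ^ 32 = 4 * n := by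
    rw [w_rdx_114b1f, c8e_lea4 _ (by rw [BitVec.toNat_ofNat]; omega), BitVec.toNat_ofNat]
    omega
  have hne : s_114b1f.reg .rsi ≠ 0 := by
    intro h0
    rw [h0] at e_rsi
    have : (0 : Word).toNat = 0 := rfl
    omega
  obtain ⟨q1, q2, q3, q4⟩ := Cur.free_call hfr0 hcur w_mem_114b1f e_a e_sp e_rdi hT e_rsi (by rw [e_rdx]) w_same w_post hne
    w_rip w_rsp (Vorbis.conv_code_eqOn w_code) w_inv (w_kept.get .r14 rfl)
  -- the temp blocks left: P2 = (codewords, 4·SE), P1 = (lengths, E)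
  have hT' := (c8e_temps_tail htemps (A.1.T + r8 ((s_114b1f.reg .rdx).toNat % 2 ^ 32) + 32)).2
  rw [← hrest] at hT'
  rw [hn] at hT'
  have hrbp : s_114b1fr.reg .rbp = addr (g.cb v.mem i + 0x840) := by
    rw [w_rbp, hcur.r14, Vorbis.addr_add_lit]
  have hrbx : s_114b1fr.reg .rbx = addr lengths := by
    rw [w_kept.get .rbx rfl]
    exact h.core.rbx
  apply ReachVia.done
  right
  exact c8e_sparse_build h hsp q1 q2 q3 q4 (fun B hB => hB) hT' w_r15 hrbp hrbx

end Vorbis.Spec.start_decoder_C8e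

/-- The unit `start_decoder.C8e`: the dispatch on `c->sparse` (K2: 0 or 1), one walk per arm. -/
theorem Vorbis.Spec.Worked.start_decoder_C8e_ok : Vorbis.Spec.start_decoder_C8e.Statement := by
  intro Lay hLay μ hμ u₀ hcode hld4 hld1 hfree g i v hat
  obtain ⟨A, lengths, values, A2, A3, Ai, Aw, Ab, h⟩ := hat
  rcases h.core.k2.sparse_01 with hsp | hsp
  · exact Vorbis.Spec.start_decoder_C8e.c8e_dense_walk hLay hμ hcode hld1 h hsp
  · exact Vorbis.Spec.start_decoder_C8e.c8e_sparse_walk hLay hμ hcode hld4 hld1 hfree h hsp
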